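-- pv_equiv track=rewrite | github.com/Jang-wj/KEB_python | dayy05.py | calculate_fee
-- ===== SOURCE A (Python) =====
-- def calculate_fee(args) -> list:
--     '''
--     놀이공원 요금 계산 프로그램
--     :param args: ages in list
--     :return: 지불할 총 입장료, 어른 수, 아이 수, 전체 인원 수
--     '''
--     total = 0
--     adult = 0
--     child = 0
--     for age in args:
--         if 19 <= age:
--             total += 10000
--             adult += 1
--         else:
--             total += 3000
--             child += 1
--     return [len(args), adult, child, total]
-- ===== SOURCE B (Python) =====
-- def calculate_fee(args) -> list:
--     # Sort the ages, then binary-search for the first adult (age >= 19):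
--     # everything before that position is a child, everything from it on an adult.
--     ages = sorted(args)
--     n = len(ages)
--     lo, hi = 0, n
--     while lo < hi:
--         mid = (lo + hi) // 2
--         if ages[mid] < 19:
--             lo = mid + 1
--         else:
--             hi = mid
--     child = lo
--     adult = n - child
--     return [n, adult, child, adult * 10000 + child * 3000]
-- ===== Notes on version B (the rewrite author's own statement) =====
-- stated objective: alternative
-- what changed: Instead of accumulating total/adult/child branch-by-branch in one scan, B sorts the ages and binary-searches for the first adult position; the two counts are read off that index and the total is the closed-form adult*10000 + child*3000.
import Mathlib
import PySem

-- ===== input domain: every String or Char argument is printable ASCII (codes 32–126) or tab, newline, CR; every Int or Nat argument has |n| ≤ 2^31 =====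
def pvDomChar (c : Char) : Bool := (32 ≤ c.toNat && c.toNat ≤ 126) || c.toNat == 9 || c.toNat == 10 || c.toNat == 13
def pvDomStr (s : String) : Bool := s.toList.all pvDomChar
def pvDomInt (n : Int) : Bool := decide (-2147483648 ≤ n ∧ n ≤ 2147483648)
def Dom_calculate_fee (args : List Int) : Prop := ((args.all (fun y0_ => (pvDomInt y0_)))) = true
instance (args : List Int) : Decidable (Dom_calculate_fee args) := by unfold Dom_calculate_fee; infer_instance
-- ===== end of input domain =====

-- B sorts the ages and binary-searches for the first adult position (age >= 19); the two
-- counts are read off that index and the total is adult*10000 + child*3000 (objective: alternative).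


-- ===== PORT A =====
def calculate_fee (args : List Int) : List Int :=
  let st := args.foldl (fun (s : Int × Int × Int) age =>
    if 19 ≤ age then (s.1 + 10000, s.2.1 + 1, s.2.2)
    else (s.1 + 3000, s.2.1, s.2.2 + 1)) (0, 0, 0)
  [(args.length : Int), st.2.1, st.2.2, st.1]

-- ===== PORT B =====
-- the hand-written while-loop binary search of Source B; ages[mid] is only read when
-- lo < hi ≤ len(ages), where it is in range, so the .getD 0 default is never taken
def pvBisect (ages : List Int) (lo hi : Nat) : Nat :=
  if lo < hi then
    let mid := (lo + hi) / 2
    if (PySem.List.pyGet? ages (mid : Int)).getD 0 < 19 then pvBisect ages (mid + 1) hi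
    else pvBisect ages lo mid
  else lo
termination_by hi - lo
decreasing_by all_goals omega

def calculate_fee_alt (args : List Int) : List Int :=
  let ages := PySem.List.sorted args (fun x => x) false
  let n := ages.length
  let child : Int := (pvBisect ages 0 n : Int)
  let adult : Int := (n : Int) - child
  [(n : Int), adult, child, adult * 10000 + child * 3000]

-- ===== PRECONDITION & SPEC =====
def Spec_calculate_fee (args : List Int) (out : List Int) : Prop := out = calculate_fee_alt args
instance (args : List Int) (out : List Int) : Decidable (Spec_calculate_fee args out) := by unfold Spec_calculate_fee; infer_instance

-- ===== CLAIM (what is proved, stated in full; the proofs are below) =====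
def Claim_equal_calculate_fee : Prop := ∀ (args : List Int), Dom_calculate_fee args → Spec_calculate_fee args (calculate_fee args)

-- ===== LEMMAS AND PROOFS =====

-- A's fold computes the adult-filter count and the linear-combination total
lemma fee_fold (args : List Int) (t a c : Int) :
    args.foldl (fun (s : Int × Int × Int) age =>
      if 19 ≤ age then (s.1 + 10000, s.2.1 + 1, s.2.2)
      else (s.1 + 3000, s.2.1, s.2.2 + 1)) (t, a, c) =
    (t + ((args.filter (fun age => 19 ≤ age)).length : Int) * 10000
       + ((args.length : Int) - (args.filter (fun age => 19 ≤ age)).length) * 3000,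
     a + ((args.filter (fun age => 19 ≤ age)).length : Int),
     c + ((args.length : Int) - (args.filter (fun age => 19 ≤ age)).length)) := by
  induction args generalizing t a c with
  | nil => simp
  | cons x xs ih =>
    by_cases h : 19 ≤ x <;>
      simp [List.foldl, List.filter, h, ih] <;>
      constructor <;> ring

-- in a ≤-sorted list, an element < 19 at index i forces at least i+1 elements < 19
lemma count_gt_of_getElem_lt (l : List Int) (hp : l.Pairwise (· ≤ ·))
    (i : Nat) (hi : i < l.length) (h : l[i] < 19) :
    i < l.countP (fun a => decide (a < 19)) := by
  have hmono := List.pairwise_iff_getElem.mp hp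
  have hlen0 : (l.take (i + 1)).length = i + 1 := by rw [List.length_take]; omega
  have hall : ∀ a ∈ l.take (i + 1), (fun a => decide (a < 19)) a = true := by
    intro a ha
    obtain ⟨j, hj, rfl⟩ := List.mem_iff_getElem.mp ha
    have hjl : j < l.length := by rw [List.length_take] at hj; omega
    have hji : j ≤ i := by rw [List.length_take] at hj; omega
    rw [List.getElem_take]
    rcases eq_or_lt_of_le hji with rfl | hlt
    · simpa using h
    · have : l[j] ≤ l[i] := hmono j i hjl hi hlt
      simp; omega
  have htake := List.countP_eq_length.mpr hall
  have : l.countP (fun a => decide (a < 19)) =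
      (l.take (i+1)).countP (fun a => decide (a < 19)) + (l.drop (i+1)).countP (fun a => decide (a < 19)) := by
    conv_lhs => rw [← List.take_append_drop (i+1) l]
    rw [List.countP_append]
  omega

-- in a ≤-sorted list, an element ≥ 19 at index i caps the count of elements < 19 at i
lemma count_le_of_getElem_ge (l : List Int) (hp : l.Pairwise (· ≤ ·))
    (i : Nat) (hi : i < l.length) (h : ¬ l[i] < 19) :
    l.countP (fun a => decide (a < 19)) ≤ i := by
  have hmono := List.pairwise_iff_getElem.mp hp
  have hdrop : (l.drop i).countP (fun a => decide (a < 19)) = 0 := by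
    rw [List.countP_eq_zero]
    intro a ha
    obtain ⟨j, hj, rfl⟩ := List.mem_iff_getElem.mp ha
    have hjl : i + j < l.length := by rw [List.length_drop] at hj; omega
    rw [List.getElem_drop]
    rcases Nat.eq_zero_or_pos j with rfl | hj0
    · simpa using h
    · have : l[i] ≤ l[i + j] := hmono i (i + j) hi hjl (by omega)
      simp; omega
  have hsplit : l.countP (fun a => decide (a < 19)) =
      (l.take i).countP (fun a => decide (a < 19)) + (l.drop i).countP (fun a => decide (a < 19)) := by
    conv_lhs => rw [← List.take_append_drop i l]
    rw [List.countP_append]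
  have h1 := List.countP_le_length (p := fun a => decide (a < 19)) (l := l.take i)
  have h2 : (l.take i).length ≤ i := by rw [List.length_take]; omega
  omega

-- B's binary search finds the number of elements < 19 of a ≤-sorted list
lemma pvBisect_eq_countP (l : List Int) (hp : l.Pairwise (· ≤ ·)) :
    ∀ (d lo hi : Nat), hi - lo ≤ d → lo ≤ l.countP (fun a => decide (a < 19)) →
      l.countP (fun a => decide (a < 19)) ≤ hi → hi ≤ l.length →
      pvBisect l lo hi = l.countP (fun a => decide (a < 19)) := by
  intro d
  induction d with
  | zero =>
    intro lo hi hd h1 h2 h3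
    rw [pvBisect]
    have : ¬ lo < hi := by omega
    simp [this]; omega
  | succ d ih =>
    intro lo hi hd h1 h2 h3
    rw [pvBisect]
    by_cases hlh : lo < hi
    · simp only [hlh, if_true]
      have hmid : (lo + hi) / 2 < l.length := by omega
      have hget : PySem.List.pyGet? l (((lo + hi) / 2 : Nat) : Int) = some l[(lo + hi) / 2] := by
        rw [PySem.List.pyGet?_natCast, List.getElem?_eq_getElem hmid]
      rw [hget]
      by_cases hv : l[(lo + hi) / 2] < 19
      · have := count_gt_of_getElem_lt l hp _ hmid hv
        simp only [Option.getD_some, hv, if_true]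
        exact ih _ _ (by omega) (by omega) h2 h3
      · have := count_le_of_getElem_ge l hp _ hmid hv
        simp only [Option.getD_some, hv, if_false]
        exact ih _ _ (by omega) h1 (by omega) (by omega)
    · simp [hlh]; omega

-- the two filters partition the list
lemma count_split (args : List Int) :
    args.countP (fun a => decide (a < 19)) + (args.filter (fun age => 19 ≤ age)).length = args.length := by
  rw [← List.countP_eq_length_filter]
  rw [List.length_eq_countP_add_countP (p := fun a => decide (a < 19)) (l := args)]
  congr 1
  apply List.countP_congr
  intro a _
  simp

-- ===== VERDICT (by name: the statement is the Claim_ definition above) =====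
theorem calculate_fee_spec : Claim_equal_calculate_fee := by
  intro args _
  unfold Spec_calculate_fee calculate_fee calculate_fee_alt
  simp only [fee_fold]
  set l := PySem.List.sorted args (fun x => x) false with hl
  have hperm : l.Perm args := PySem.List.sorted_perm ..
  have hpw : l.Pairwise (· ≤ ·) := by
    have := PySem.List.sorted_pairwise (xs := args) (key := fun x => x)
    simpa using this
  have hcount : l.countP (fun a => decide (a < 19)) = args.countP (fun a => decide (a < 19)) :=
    hperm.countP_eq _
  have hlen : l.length = args.length := hperm.length_eq
  have hb : pvBisect l 0 l.length = l.countP (fun a => decide (a < 19)) :=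
    pvBisect_eq_countP l hpw l.length 0 l.length (by omega)
      (by omega) List.countP_le_length (le_refl _)
  have hcs := count_split args
  rw [hb, hlen, hcount]
  have hA : ((args.filter (fun age => 19 ≤ age)).length : Int) =
      (args.length : Int) - (args.countP (fun a => decide (a < 19)) : Int) := by omega
  simp only [hA]
  norm_num
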